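-- pv_equiv track=rewrite | github.com/kenbockler/Andmeteaduse_masin-ppe_projekt | PROJEKT/K07/S073/2021-10-09-20-58-22/kodu2.py | get_cheapest
-- ===== SOURCE A (Python) =====
-- def get_cheapest(prices, km):
--     try:
--         priceList = dict()
--         for co in prices:
--             priceList[co] = prices[co][0]+prices[co][1]*km
--         return min(priceList, key=priceList.get)
--     except:
--         return None
-- ===== SOURCE B (Python) =====
-- def get_cheapest(prices, km):
--     # single pass: track the current best company and its cost; no intermediate dict
--     best = None
--     best_cost = None
--     try:
--         for co in prices:
--             cost = prices[co][0] + prices[co][1] * km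
--             if best is None or cost < best_cost:
--                 best, best_cost = co, cost
--     except:
--         return None
--     return best
-- ===== Notes on version B (the rewrite author's own statement) =====
-- stated objective: simpler
-- what changed: Replaces A's two-phase dict-of-costs construction followed by a min() scan with one streaming pass that keeps only the current best company and cost (first minimum wins via strict <), with the same try/except-to-None behaviour.
import Mathlib
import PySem

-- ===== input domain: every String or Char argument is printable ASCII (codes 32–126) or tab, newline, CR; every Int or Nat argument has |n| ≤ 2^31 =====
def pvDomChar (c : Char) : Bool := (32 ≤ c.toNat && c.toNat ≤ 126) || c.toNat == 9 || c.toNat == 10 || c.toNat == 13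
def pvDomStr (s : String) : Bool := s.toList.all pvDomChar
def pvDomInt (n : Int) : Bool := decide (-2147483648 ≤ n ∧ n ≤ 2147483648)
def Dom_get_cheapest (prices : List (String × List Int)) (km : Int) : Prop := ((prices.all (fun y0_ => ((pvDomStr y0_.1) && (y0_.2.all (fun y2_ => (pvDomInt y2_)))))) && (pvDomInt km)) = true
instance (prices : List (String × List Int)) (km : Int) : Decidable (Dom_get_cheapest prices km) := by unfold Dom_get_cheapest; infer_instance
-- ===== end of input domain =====

-- B replaces A's dict-of-costs + min() scan with a single streaming pass keeping only the
-- current best company and cost (simpler; first minimum still wins via strict <).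
-- The `prices` parameter is a Python dict, modelled as its association list; both ports view
-- it through PySem.Dict.ofList (Python's dict semantics: first key position, last value wins).

-- ===== PORT A =====
-- 'for co in prices: priceList[co] = prices[co][0] + prices[co][1]*km', over the dict's items;
-- any IndexError (too-short value list) makes the whole try-block return None.
def aBuild (km : Int) : List (String × List Int) → PySem.Dict String Int → Option (PySem.Dict String Int)
  | [], pl => some pl
  | (co, v) :: rest, pl =>
    match PySem.List.pyGet? v 0, PySem.List.pyGet? v 1 with
    | some a, some b => aBuild km rest (pl.insert co (a + b * km))
    | _, _ => none

def get_cheapest (prices : List (String × List Int)) (km : Int) : Option String :=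
  let d := PySem.Dict.ofList prices
  match aBuild km d.items PySem.Dict.empty with
  | none => none
  | some pl =>
    -- min(priceList, key=priceList.get): every scanned key is in priceList, so .get = getD _ 0
    PySem.List.min? pl.keys (fun k => pl.getD k 0)

-- ===== PORT B =====
-- single pass: best = None / (company, cost); strict '<' keeps the first minimum
def bLoop (km : Int) : List (String × List Int) → Option (String × Int) → Option String
  | [], best => best.map Prod.fst
  | (co, v) :: rest, best =>
    match PySem.List.pyGet? v 0, PySem.List.pyGet? v 1 with
    | some a, some b =>
      let cost := a + b * km
      match best with
      | none => bLoop km rest (some (co, cost))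
      | some m => if cost < m.2 then bLoop km rest (some (co, cost)) else bLoop km rest (some m)
    | _, _ => none

def get_cheapest_alt (prices : List (String × List Int)) (km : Int) : Option String :=
  bLoop km (PySem.Dict.ofList prices).items none

-- ===== PRECONDITION & SPEC =====
def Spec_get_cheapest (prices : List (String × List Int)) (km : Int) (out : Option String) : Prop := out = get_cheapest_alt prices km
instance (prices : List (String × List Int)) (km : Int) (out : Option String) : Decidable (Spec_get_cheapest prices km out) := by unfold Spec_get_cheapest; infer_instance

-- ===== CLAIM (what is proved, stated in full; the proofs are below) =====
def Claim_equal_get_cheapest : Prop := ∀ (prices : List (String × List Int)) (km : Int), Dom_get_cheapest prices km → Spec_get_cheapest prices km (get_cheapest prices km)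

-- ===== LEMMAS AND PROOFS =====

-- the list of (company, cost) pairs, or none on the first malformed entry
def costs? (km : Int) : List (String × List Int) → Option (List (String × Int))
  | [] => some []
  | (co, v) :: rest =>
    match PySem.List.pyGet? v 0, PySem.List.pyGet? v 1 with
    | some a, some b => (costs? km rest).map (((co, a + b * km)) :: ·)
    | _, _ => none

-- the min?-style fold step on (company, cost) pairs, for a key K
def minStepK (K : String × Int → Int) (acc : Option (String × Int)) (x : String × Int) : Option (String × Int) :=
  match acc with
  | none => some x
  | some m => if K x < K m then some x else some m

theorem bLoop_char (km : Int) (xs : List (String × List Int)) :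
    ∀ best, bLoop km xs best =
      match costs? km xs with
      | none => none
      | some cs => (cs.foldl (minStepK Prod.snd) best).map Prod.fst := by
  induction xs with
  | nil => intro best; rfl
  | cons p rest ih =>
    intro best
    obtain ⟨co, v⟩ := p
    simp only [bLoop, costs?]
    cases h0 : PySem.List.pyGet? v 0 with
    | none => rfl
    | some a =>
      cases h1 : PySem.List.pyGet? v 1 with
      | none => rfl
      | some b =>
        simp only []
        cases best with
        | none =>
          rw [ih]
          cases costs? km rest <;> simp [minStepK]
        | some m =>
          by_cases hc : a + b * km < m.2
          · simp only [hc, ih]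
            cases costs? km rest <;> simp [minStepK, hc]
          · simp only [if_neg hc, ih]
            cases costs? km rest <;> simp [minStepK, hc]

theorem aBuild_char (km : Int) (xs : List (String × List Int)) :
    ∀ pl : PySem.Dict String Int,
      (xs.map Prod.fst).Nodup →
      (∀ c ∈ xs.map Prod.fst, c ∉ pl.items.map Prod.fst) →
      aBuild km xs pl = (costs? km xs).map (fun cs => PySem.Dict.mk (pl.items ++ cs)) := by
  induction xs with
  | nil => intro pl _ _; simp [aBuild, costs?]
  | cons p rest ih =>
    intro pl hnd hfresh
    obtain ⟨co, v⟩ := p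
    simp only [aBuild, costs?]
    cases h0 : PySem.List.pyGet? v 0 with
    | none => rfl
    | some a =>
      cases h1 : PySem.List.pyGet? v 1 with
      | none => rfl
      | some b =>
        simp only []
        have hco : co ∉ pl.items.map Prod.fst := hfresh co (by simp)
        have hins : pl.insert co (a + b * km) = PySem.Dict.mk (pl.items ++ [(co, a + b * km)]) := by
          apply PySem.Dict.ext
          rw [PySem.Dict.items_insert_of_not_contains]
          have : co ∉ pl.keys := by
            simpa [PySem.Dict.keys] using hco
          simp [← PySem.Dict.contains_iff_mem_keys] at this
          exact this
        rw [hins, ih]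
        · cases costs? km rest <;> simp
        · exact (List.nodup_cons.mp (by simpa using hnd)).2
        · intro c hc
          simp only [List.map_append]
          intro hmem
          rcases List.mem_append.mp hmem with h | h
          · exact hfresh c (by simp [hc]) h
          · simp at h
            subst h
            exact (List.nodup_cons.mp (by simpa using hnd)).1 hc

theorem minFold_congr (k1 k2 : String × Int → Int) (cs : List (String × Int)) :
    ∀ acc : Option (String × Int),
      (∀ c ∈ cs, k1 c = k2 c) →
      (∀ m, acc = some m → k1 m = k2 m) →
      cs.foldl (minStepK k1) acc = cs.foldl (minStepK k2) acc := by
  induction cs with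
  | nil => intro _ _ _; rfl
  | cons c rest ih =>
    intro acc hcs hacc
    have hc1 : k1 c = k2 c := hcs c (by simp)
    have hrest : ∀ x ∈ rest, k1 x = k2 x := fun x hx => hcs x (List.mem_cons_of_mem _ hx)
    cases acc with
    | none =>
      rw [List.foldl_cons, List.foldl_cons,
        show minStepK k1 none c = some c from rfl, show minStepK k2 none c = some c from rfl]
      exact ih (some c) hrest (fun m hm => by injection hm with h; subst h; exact hc1)
    | some m0 =>
      have hm0 : k1 m0 = k2 m0 := hacc m0 rfl
      have hstep : minStepK k1 (some m0) c = minStepK k2 (some m0) c := by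
        simp [minStepK, hc1, hm0]
      rw [List.foldl_cons, List.foldl_cons, hstep]
      refine ih _ hrest ?_
      intro m hm
      simp only [minStepK] at hm
      split_ifs at hm
      · injection hm with h; subst h; exact hc1
      · injection hm with h; subst h; exact hm0

theorem min?_map_fst (K : String → Int) (cs : List (String × Int)) :
    PySem.List.min? (cs.map Prod.fst) K =
      (cs.foldl (minStepK (fun c => K c.1)) none).map Prod.fst := by
  unfold PySem.List.min?
  rw [List.foldl_map]
  show List.foldl _ (Option.map (Prod.fst : String × Int → String) (none : Option (String × Int))) cs = _
  refine List.foldl_hom (Option.map Prod.fst) ?_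
  intro acc x
  cases acc with
  | none => rfl
  | some m => by_cases h : K x.1 < K m.1 <;> simp [minStepK, h]

theorem costs?_keys (km : Int) : ∀ (xs : List (String × List Int)) (cs : List (String × Int)),
    costs? km xs = some cs → cs.map Prod.fst = xs.map Prod.fst := by
  intro xs
  induction xs with
  | nil => intro cs h; simp [costs?] at h; subst h; rfl
  | cons p rest ih =>
    intro cs h
    obtain ⟨co, v⟩ := p
    simp only [costs?] at h
    cases h0 : PySem.List.pyGet? v 0 <;> rw [h0] at h
    · exact absurd h (by simp)
    cases h1 : PySem.List.pyGet? v 1 <;> rw [h1] at h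
    · exact absurd h (by simp)
    simp only [] at h
    cases hr : costs? km rest <;> rw [hr] at h
    · exact absurd h (by simp)
    simp at h
    subst h
    simp [ih _ hr]

theorem get_cheapest_eq_core (km : Int) (d : PySem.Dict String (List Int)) (hnd : d.keys.Nodup) :
    (match aBuild km d.items PySem.Dict.empty with
      | none => none
      | some pl => PySem.List.min? pl.keys (fun k => pl.getD k 0)) = bLoop km d.items none := by
  have hndi : (d.items.map Prod.fst).Nodup := by simpa [PySem.Dict.keys] using hnd
  rw [aBuild_char km d.items PySem.Dict.empty hndi (by simp [PySem.Dict.empty])]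
  rw [bLoop_char]
  cases h : costs? km d.items with
  | none => rfl
  | some cs => ?_
  simp only [Option.map_some]
  -- keys/getD of the literal cost dict
  have hkeys : (PySem.Dict.mk ((PySem.Dict.empty : PySem.Dict String Int).items ++ cs)).keys = cs.map Prod.fst := by
    simp [PySem.Dict.empty, PySem.Dict.keys]
  have hcsnd : (cs.map Prod.fst).Nodup := by
    rw [costs?_keys km d.items cs h]
    exact hndi
  rw [hkeys]
  rw [min?_map_fst]
  have hgetD : ∀ c ∈ cs, (PySem.Dict.mk ((PySem.Dict.empty : PySem.Dict String Int).items ++ cs)).getD c.1 0 = c.2 := by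
    intro c hc
    apply PySem.Dict.getD_of_mem_items
    · simpa [PySem.Dict.empty, PySem.Dict.items] using hc
    · rw [hkeys]; exact hcsnd
  rw [minFold_congr
      (fun c => (PySem.Dict.mk ((PySem.Dict.empty : PySem.Dict String Int).items ++ cs)).getD c.1 0)
      Prod.snd cs none hgetD (by intro m hm; cases hm)]

theorem get_cheapest_eq (prices : List (String × List Int)) (km : Int) :
    get_cheapest prices km = get_cheapest_alt prices km := by
  unfold get_cheapest get_cheapest_alt
  exact get_cheapest_eq_core km (PySem.Dict.ofList prices) (PySem.Dict.nodup_keys_ofList prices)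

-- ===== VERDICT (by name: the statement is the Claim_ definition above) =====
theorem get_cheapest_spec : Claim_equal_get_cheapest := by
  intro prices km _
  unfold Spec_get_cheapest
  exact get_cheapest_eq prices km
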